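-- pv_equiv track=rewrite | github.com/SebasAguirre979/PruebaTecnicaRPA | Punto3.py | modificar_arreglo
-- ===== SOURCE A (Python) =====
-- def modificar_arreglo (arreglo):
--     indice = 0
--     resultado_final = []
--     while arreglo:
--         elemento = arreglo.pop(indice)
--         resultado_elemento = comparar(elemento, arreglo)
--         resultado_final.append(resultado_elemento)
--     return resultado_final
--
-- def comparar(numero, arreglo):
--     resul = [numero]
--     for elemento in arreglo[:]:
--         if elemento == numero:
--             resul.append(elemento)
--             arreglo.remove(elemento)
--     return resul
-- ===== SOURCE B (Python) =====
-- def modificar_arreglo(arreglo):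
--     # Count each value in one pass (dict preserves first-occurrence order),
--     # then emit one group per distinct value. Like A, the input list is
--     # emptied in place.
--     conteos = {}
--     for x in arreglo:
--         conteos[x] = conteos.get(x, 0) + 1
--     arreglo.clear()
--     return [[v] * c for v, c in conteos.items()]
-- ===== Notes on version B (the rewrite author's own statement) =====
-- stated objective: faster
-- what changed: Replaces A's repeated pop/scan/remove over the shrinking list (a quadratic extraction loop) with a single counting pass into an insertion-ordered dict, then builds each group as [value]*count.
import Mathlib
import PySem

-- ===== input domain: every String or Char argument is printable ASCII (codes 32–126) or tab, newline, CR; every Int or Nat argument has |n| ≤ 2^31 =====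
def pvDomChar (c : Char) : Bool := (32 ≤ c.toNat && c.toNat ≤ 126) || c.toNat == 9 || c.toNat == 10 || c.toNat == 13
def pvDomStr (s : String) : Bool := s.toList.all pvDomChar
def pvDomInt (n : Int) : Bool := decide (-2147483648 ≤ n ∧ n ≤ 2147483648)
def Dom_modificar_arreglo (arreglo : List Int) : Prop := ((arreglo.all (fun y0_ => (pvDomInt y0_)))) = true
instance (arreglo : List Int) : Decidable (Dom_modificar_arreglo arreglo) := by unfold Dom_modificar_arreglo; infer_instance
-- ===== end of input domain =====

-- B replaces A's quadratic pop/scan/remove extraction loop with one counting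
-- pass over the list (objective: faster). Both A and B empty the input list in
-- place; the equivalence proved here is about the return value only.

-- ===== PORT A =====
-- 'for elemento in arreglo[:]: if elemento == numero: resul.append; arreglo.remove'
def compararLoop (numero : Int) : List Int → List Int × List Int → List Int × List Int
  | [], st => st
  | e :: rest, (resul, arr) =>
      if e == numero then
        compararLoop numero rest (resul ++ [e], (PySem.List.remove? arr e).getD arr)
      else
        compararLoop numero rest (resul, arr)

-- comparar returns (resul, arreglo-after-mutation)
def comparar (numero : Int) (arreglo : List Int) : List Int × List Int :=
  compararLoop numero arreglo ([numero], arreglo)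

-- 'while arreglo:' — fuel-bounded loop; length+1 fuel always suffices
def modificarLoop : Nat → List Int → List (List Int) → List (List Int)
  | 0, _, acc => acc
  | fuel + 1, arr, acc =>
      match PySem.List.pop? arr 0 with
      | none => acc
      | some (elemento, arr1) =>
          let r := comparar elemento arr1
          modificarLoop fuel r.2 (acc ++ [r.1])

def modificar_arreglo (arreglo : List Int) : List (List Int) :=
  modificarLoop (arreglo.length + 1) arreglo []

-- ===== PORT B =====
def modificar_arreglo_alt (arreglo : List Int) : List (List Int) :=
  let conteos := arreglo.foldl (fun d x => d.insert x (d.getD x 0 + 1)) (PySem.Dict.empty : PySem.Dict Int Int)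
  conteos.items.map (fun p => List.replicate p.2.toNat p.1)

-- ===== PRECONDITION & SPEC =====
def Spec_modificar_arreglo (arreglo : List Int) (out : List (List Int)) : Prop := out = modificar_arreglo_alt arreglo
instance (arreglo : List Int) (out : List (List Int)) : Decidable (Spec_modificar_arreglo arreglo out) := by unfold Spec_modificar_arreglo; infer_instance

-- ===== CLAIM (what is proved, stated in full; the proofs are below) =====
def Claim_equal_modificar_arreglo : Prop := ∀ (arreglo : List Int), Dom_modificar_arreglo arreglo → Spec_modificar_arreglo arreglo (modificar_arreglo arreglo)

-- ===== LEMMAS AND PROOFS =====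

-- common form both sides are reduced to: one group per first occurrence
def grupos (xs : List Int) : List (List Int) :=
  (PySem.Set.ofList xs).map (fun k => List.replicate (List.count k xs) k)

theorem remove?_append_cons_self {x : Int} (p t : List Int) (hx : x ∉ p) :
    PySem.List.remove? (p ++ x :: t) x = some (p ++ t) := by
  induction p with
  | nil => simp [PySem.List.remove?_cons_self]
  | cons a p ih =>
      have ha : a ≠ x := by rintro rfl; exact hx (List.mem_cons_self ..)
      have hx' : x ∉ p := fun h => hx (List.mem_cons_of_mem _ h)
      simp [PySem.List.remove?_cons_of_ne _ ha, ih hx']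

theorem compararLoop_spec (numero : Int) (l : List Int) :
    ∀ (p resul : List Int), numero ∉ p →
    compararLoop numero l (resul, p ++ l) =
      (resul ++ l.filter (fun x => x == numero),
       p ++ l.filter (fun x => !(x == numero))) := by
  induction l with
  | nil => intro p resul _; simp [compararLoop]
  | cons x rest ih =>
      intro p resul hp
      by_cases hx : x = numero
      · subst hx
        have hrem := remove?_append_cons_self p rest hp
        simp only [compararLoop, beq_self_eq_true, if_true, hrem, Option.getD_some]
        rw [ih p (resul ++ [x]) hp]
        simp
      · have hb : (x == numero) = false := by simp [hx]
        have hp' : numero ∉ p ++ [x] := by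
          simp [hp]; exact fun h => hx h.symm
        have harr : p ++ x :: rest = (p ++ [x]) ++ rest := by simp
        simp only [compararLoop, hb, Bool.false_eq_true, if_false]
        rw [harr, ih (p ++ [x]) resul hp']
        simp [hb]

theorem comparar_spec (numero : Int) (l : List Int) :
    comparar numero l =
      (numero :: l.filter (fun x => x == numero),
       l.filter (fun x => !(x == numero))) := by
  have := compararLoop_spec numero l [] [numero] (by simp)
  simpa [comparar] using this

-- PySem.Set.ofList decomposition by the head's value
theorem foldl_add_cons_of_not_mem (x : Int) (l : List Int)
    (h : ∀ y ∈ l, y ≠ x) :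
    ∀ s : PySem.Set Int, List.foldl PySem.Set.add (x :: s) l = x :: List.foldl PySem.Set.add s l := by
  induction l with
  | nil => intro s; rfl
  | cons y rest ih =>
      intro s
      have hy : y ≠ x := h y (List.mem_cons_self ..)
      have h' : ∀ z ∈ rest, z ≠ x := fun z hz => h z (List.mem_cons_of_mem _ hz)
      have hadd : PySem.Set.add (x :: s) y = x :: PySem.Set.add s y := by
        simp only [PySem.Set.add, PySem.Set.contains]
        have : ((x :: s).contains y) = s.contains y := by
          simp [hy]
        by_cases hc : s.contains y = true <;> simp_all
      simp only [List.foldl_cons, hadd, ih h']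

theorem foldl_add_skip_mem (x : Int) (l : List Int) :
    ∀ s : PySem.Set Int, x ∈ s →
    List.foldl PySem.Set.add s l = List.foldl PySem.Set.add s (l.filter (fun y => !(y == x))) := by
  induction l with
  | nil => intro s _; rfl
  | cons y rest ih =>
      intro s hs
      by_cases hy : y = x
      · subst hy
        have : PySem.Set.add s y = s := by
          simp [PySem.Set.add, PySem.Set.contains, hs]
        simp [this, ih s hs]
      · have hmem : x ∈ PySem.Set.add s y := by
          simp only [PySem.Set.add]
          by_cases hc : (PySem.Set.contains s y) = true <;> simp_all [PySem.Set.contains]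
        have hb : (y == x) = false := by simp [hy]
        simp [hb, ih _ hmem]

theorem ofList_cons_decomp (e : Int) (l : List Int) :
    PySem.Set.ofList (e :: l) = e :: PySem.Set.ofList (l.filter (fun y => !(y == e))) := by
  have h1 : PySem.Set.ofList (e :: l) = List.foldl PySem.Set.add [e] l := by
    simp [PySem.Set.ofList, PySem.Set.add, PySem.Set.empty, PySem.Set.contains]
  rw [h1, foldl_add_skip_mem e l [e] (List.mem_cons_self ..)]
  have h2 : ∀ y ∈ l.filter (fun y => !(y == e)), y ≠ e := by
    intro y hy
    have := List.of_mem_filter hy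
    simpa using this
  have := foldl_add_cons_of_not_mem e (l.filter (fun y => !(y == e))) h2 []
  simpa [PySem.Set.ofList] using this

theorem grupos_cons (e : Int) (rest : List Int) :
    grupos (e :: rest) =
      (e :: rest.filter (fun x => x == e)) :: grupos (rest.filter (fun x => !(x == e))) := by
  unfold grupos
  rw [ofList_cons_decomp]
  simp only [List.map_cons]
  congr 1
  · rw [List.filter_beq]
    simp [List.count_cons_self, List.replicate_succ]
  · apply List.map_congr_left
    intro k hk
    have hk' : k ∈ rest.filter (fun y => !(y == e)) := by
      have := PySem.Set.mem_ofList (xs := rest.filter (fun y => !(y == e))) (y := k)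
      exact this.mp hk
    have hne : (k == e) = false := by
      have := List.of_mem_filter hk'
      simpa using this
    have hcount : List.count k (rest.filter (fun y => !(y == e))) = List.count k rest := by
      apply List.count_filter
      simp [hne]
    have hne' : k ≠ e := by simpa using hne
    simp [List.count_cons, hcount]; exact fun h => hne' h.symm

theorem modificarLoop_spec :
    ∀ (fuel : Nat) (xs : List Int) (acc : List (List Int)), xs.length < fuel →
    modificarLoop fuel xs acc = acc ++ grupos xs := by
  intro fuel
  induction fuel with
  | zero => intro xs acc h; omega
  | succ fuel ih =>
      intro xs acc h
      cases xs with
      | nil => simp [modificarLoop, PySem.List.pop?, grupos, PySem.Set.ofList]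
      | cons e rest =>
          have hlen : (rest.filter (fun x => !(x == e))).length < fuel := by
            have := List.length_filter_le (fun x => !(x == e)) rest
            simp only [List.length_cons] at h
            omega
          simp only [modificarLoop, PySem.List.pop?_zero_cons, comparar_spec]
          rw [ih _ _ hlen, grupos_cons]
          simp

theorem altB_eq_grupos (xs : List Int) : modificar_arreglo_alt xs = grupos xs := by
  unfold modificar_arreglo_alt grupos
  rw [PySem.Dict.foldl_insert_getD_add_one_eq_counter]
  simp only [PySem.Dict.items_counter, List.map_map]
  apply List.map_congr_left
  intro k _
  simp

-- ===== VERDICT (by name: the statement is the Claim_ definition above) =====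
theorem modificar_arreglo_spec : Claim_equal_modificar_arreglo := by
  intro arreglo _
  unfold Spec_modificar_arreglo modificar_arreglo
  rw [modificarLoop_spec (arreglo.length + 1) arreglo [] (by omega), altB_eq_grupos]
  simp
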